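-- pv_equiv track=rewrite | github.com/xDanielz/python_exercicios_pessoais | Chess_project/v1_falha/func.py | sides
-- ===== SOURCE A (Python) =====
-- def horizontal(real_value) -> list:
--     edges = [0, 7, 8, 15, 16, 23, 24, 31, 32, 39, 40, 47, 48, 55, 56, 63]
--     for n in range(len(edges)):
--         if real_value % 8 == 0:
--             real_value += 1
--         if edges[n] <= real_value <= edges[n+1]:
--             left_edge = edges[n]
--             right_edge = edges[n+1]
--             return list(range(left_edge, right_edge+1, 1))
--
-- def vertical(real_value) -> list:
--     if real_value != 0:
--         begin = list(range(real_value, -1, -8))[-1]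
--     else:
--         begin = 0
--     result = []
--     for c in range(8):
--         result.append(begin)
--         begin += 8
--     return result
--
-- def sides(real_value, vert=False, hori=False, diag=False):
--     results = dict()
--     if vert is True:
--         verti = vertical(real_value)
--         top = verti[:verti.index(real_value)]
--         bot = verti[verti.index(real_value)+1:]
--         results['Vertical'] = dict(TOP=top,
--                                    BOT=bot)
--     if hori is True:
--         hori = horizontal(real_value)
--         left = hori[:hori.index(real_value)]
--         right = hori[hori.index(real_value) + 1:]
--         results['Horizontal'] = dict(LEFT=left,
--                                      RIGHT=right)
--     if diag is True:
--         diago = diagonal(real_value)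
--         result = [[], [], [], []]
--         c = 0
--         for d in diago:
--             if d != '|':
--                 result[c].append(d)
--             else:
--                 c += 1
--         results['Diagonal'] = dict(TOP_LEFT=result[0],
--                                    TOP_RIGHT=result[1],
--                                    BOT_LEFT=result[2],
--                                    BOT_RIGHT=result[3])
--     return results
--
-- def diagonal(real_value) -> list:
--     side = sides(real_value, hori=True, vert=True)
--     leftside = sorted(side['Horizontal']['LEFT'], reverse=True)
--     rightside = side['Horizontal']['RIGHT']
--     topside = sorted(side['Vertical']['TOP'], reverse=True)
--     botside = sorted(side['Vertical']['BOT'], reverse=False)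
--     limit = max([len(leftside), len(rightside), len(topside), len(botside)])
--     result = []
--     for pos in [topside, botside]:
--         for pos1 in [leftside, rightside]:
--             for k in range(limit):
--                 try:
--                     result.append(pos[k] + pos1[k] - real_value)
--                 except IndexError:
--                     break
--             result.append('|')
--     return result
-- ===== SOURCE B (Python) =====
-- def sides(real_value, vert=False, hori=False, diag=False):
--     # coordinate arithmetic: r, c = row, column of the square
--     r, c = divmod(real_value, 8)
--     results = {}
--     if vert is True:
--         results['Vertical'] = {'TOP': [c + 8 * i for i in range(r)],
--                                'BOT': [c + 8 * i for i in range(r + 1, 8)]}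
--     if hori is True:
--         results['Horizontal'] = {'LEFT': [8 * r + j for j in range(c)],
--                                  'RIGHT': [8 * r + j for j in range(c + 1, 8)]}
--     if diag is True:
--         results['Diagonal'] = {'TOP_LEFT': [real_value - 9 * i for i in range(1, min(r, c) + 1)],
--                                'TOP_RIGHT': [real_value - 7 * i for i in range(1, min(r, 7 - c) + 1)],
--                                'BOT_LEFT': [real_value + 7 * i for i in range(1, min(7 - r, c) + 1)],
--                                'BOT_RIGHT': [real_value + 9 * i for i in range(1, min(7 - r, 7 - c) + 1)]}
--     return results
-- ===== Notes on version B (the rewrite author's own statement) =====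
-- stated objective: simpler
-- what changed: B computes r, c = divmod(real_value, 8) and produces every horizontal/vertical/diagonal list directly in closed form from the coordinates, replacing A's edge-table scan, range(-8)-stepping loop, recursive sides/diagonal round-trip and '|'-sentinel string parse.
import Mathlib
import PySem

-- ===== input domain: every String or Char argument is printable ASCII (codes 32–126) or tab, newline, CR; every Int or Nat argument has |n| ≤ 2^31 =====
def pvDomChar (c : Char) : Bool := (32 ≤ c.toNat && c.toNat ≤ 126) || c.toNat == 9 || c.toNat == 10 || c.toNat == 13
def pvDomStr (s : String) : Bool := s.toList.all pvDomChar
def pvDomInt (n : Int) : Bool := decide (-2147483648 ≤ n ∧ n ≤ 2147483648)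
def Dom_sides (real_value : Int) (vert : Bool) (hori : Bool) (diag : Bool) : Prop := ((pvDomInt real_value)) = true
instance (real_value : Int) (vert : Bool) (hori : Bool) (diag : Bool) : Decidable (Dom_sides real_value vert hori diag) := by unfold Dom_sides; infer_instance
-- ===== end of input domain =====

-- B replaces A's edge-table scan, range-stepping loop and '|'-sentinel diagonal parse by direct
-- coordinate arithmetic (r, c = divmod(v, 8)) building each of the eight lists in closed form (objective: simpler).

-- ===== PORT A =====
-- All A-side helpers return Option: none is exactly where the Python raises
-- (IndexError / ValueError / AttributeError on None); Pre_sides excludes those inputs.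

-- horizontal's 'for n in range(len(edges))' loop. Python's chained comparison
-- 'edges[n] <= real_value <= edges[n+1]' short-circuits: edges[n+1] is only fetched when
-- edges[n] <= real_value holds — mirrored exactly. fuel = remaining iterations; fuel 0 = loop
-- completed, Python returns None (sides then raises AttributeError) → none.
def pvHoriLoop (edges : List Int) (fuel : Nat) (n : Int) (rv : Int) : Option (List Int) :=
  match fuel with
  | 0 => none
  | fuel + 1 =>
    let rv := if PySem.Int.mod rv 8 = 0 then rv + 1 else rv
    match PySem.List.pyGet? edges n with
    | none => none
    | some l =>
      if l ≤ rv then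
        match PySem.List.pyGet? edges (n + 1) with
        | none => none  -- IndexError at edges[n+1]
        | some r => if rv ≤ r then some (PySem.List.pyRange l (r + 1) 1)
                    else pvHoriLoop edges fuel (n + 1) rv
      else pvHoriLoop edges fuel (n + 1) rv

def horizontalA (real_value : Int) : Option (List Int) :=
  let edges : List Int := [0, 7, 8, 15, 16, 23, 24, 31, 32, 39, 40, 47, 48, 55, 56, 63]
  pvHoriLoop edges edges.length 0 real_value

def verticalA (real_value : Int) : Option (List Int) :=
  let begin? : Option Int :=
    if real_value ≠ 0 then
      PySem.List.pyGet? (PySem.List.pyRange real_value (-1) (-8)) (-1)  -- none = IndexError on []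
    else some 0
  match begin? with
  | none => none
  | some b =>
    -- for c in range(8): result.append(begin); begin += 8
    some (((PySem.List.pyRange 0 8 1).foldl
      (fun (st : List Int × Int) _ => (st.1 ++ [st.2], st.2 + 8)) ([], b)).1)

-- the 'vert' and 'hori' branches of Python's sides, factored out so that diagonal
-- (which calls sides(real_value, hori=True, vert=True)) and sides can share them without
-- mutual recursion. Keys are always fresh, so dict insertion = appending the pair.
def sidesVH? (real_value : Int) (vert : Bool) (hori : Bool) :
    Option (List (String × List (String × List Int))) :=
  let results : List (String × List (String × List Int)) := []
  let step1 : Option (List (String × List (String × List Int))) :=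
    if vert = true then
      match verticalA real_value with
      | none => none
      | some verti =>
        match PySem.List.index? verti real_value with
        | none => none  -- ValueError from verti.index
        | some idx =>
          some (results ++ [("Vertical",
            [("TOP", PySem.List.slice verti none (some (idx : Int))),
             ("BOT", PySem.List.slice verti (some ((idx : Int) + 1)) none)])])
    else some results
  match step1 with
  | none => none
  | some results =>
    if hori = true then
      match horizontalA real_value with
      | none => none  -- also covers Python's AttributeError on None
      | some h =>
        match PySem.List.index? h real_value with
        | none => none  -- ValueError from hori.index
        | some idx =>
          some (results ++ [("Horizontal",
            [("LEFT", PySem.List.slice h none (some (idx : Int))),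
             ("RIGHT", PySem.List.slice h (some ((idx : Int) + 1)) none)])])
    else some results

-- diagonal's inner 'for k in range(limit): try: … except IndexError: break' loop
def pvDiagInner (pos pos1 : List Int) (rv : Int) (fuel : Nat) (k : Int) : List (Option Int) :=
  match fuel with
  | 0 => []
  | fuel + 1 =>
    match PySem.List.pyGet? pos k, PySem.List.pyGet? pos1 k with
    | some a, some b => some (a + b - rv) :: pvDiagInner pos pos1 rv fuel (k + 1)
    | _, _ => []  -- IndexError → break

-- diagonal; the Python list mixes ints with the string '|': ported by hand, exactly, as
-- List (Option Int) with none standing for the '|' separator.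
def diagonalA (real_value : Int) : Option (List (Option Int)) :=
  match sidesVH? real_value true true with
  | none => none
  | some side =>
    -- keys are present by construction (both flags are True), so the lookups cannot fail
    let horid : List (String × List Int) := (side.lookup "Horizontal").getD []
    let vertd : List (String × List Int) := (side.lookup "Vertical").getD []
    let leftside := PySem.List.sorted ((horid.lookup "LEFT").getD []) (fun x => x) true
    let rightside := (horid.lookup "RIGHT").getD []
    let topside := PySem.List.sorted ((vertd.lookup "TOP").getD []) (fun x => x) true
    let botside := PySem.List.sorted ((vertd.lookup "BOT").getD []) (fun x => x) false
    let limit := max (max leftside.length rightside.length) (max topside.length botside.length)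
    some ([(topside, leftside), (topside, rightside), (botside, leftside), (botside, rightside)].foldl
      (fun acc p => acc ++ pvDiagInner p.1 p.2 real_value limit 0 ++ [none]) [])

-- sides' '|'-parse: result = [[],[],[],[]]; c = 0; for d in diago: …  (result[c] out of range = IndexError → none)
def pvDistrib (ds : List (Option Int)) (c : Nat) (r0 r1 r2 r3 : List Int) :
    Option (List Int × List Int × List Int × List Int) :=
  match ds with
  | [] => some (r0, r1, r2, r3)
  | none :: ds => pvDistrib ds (c + 1) r0 r1 r2 r3
  | some d :: ds =>
    match c with
    | 0 => pvDistrib ds c (r0 ++ [d]) r1 r2 r3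
    | 1 => pvDistrib ds c r0 (r1 ++ [d]) r2 r3
    | 2 => pvDistrib ds c r0 r1 (r2 ++ [d]) r3
    | 3 => pvDistrib ds c r0 r1 r2 (r3 ++ [d])
    | _ => none

def sidesA? (real_value : Int) (vert hori diag : Bool) :
    Option (List (String × List (String × List Int))) :=
  match sidesVH? real_value vert hori with
  | none => none
  | some results =>
    if diag = true then
      match diagonalA real_value with
      | none => none
      | some diago =>
        match pvDistrib diago 0 [] [] [] [] with
        | none => none
        | some (r0, r1, r2, r3) =>
          some (results ++ [("Diagonal",
            [("TOP_LEFT", r0), ("TOP_RIGHT", r1), ("BOT_LEFT", r2), ("BOT_RIGHT", r3)])])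
    else some results

-- total wrapper: none only where the Python raises, which Pre_sides excludes
def sides (real_value : Int) (vert : Bool) (hori : Bool) (diag : Bool) :
    List (String × List (String × List Int)) :=
  (sidesA? real_value vert hori diag).getD []

-- ===== PORT B =====
def sides_alt (real_value : Int) (vert : Bool) (hori : Bool) (diag : Bool) :
    List (String × List (String × List Int)) :=
  -- r, c = divmod(real_value, 8): the divisor 8 is non-zero, so divmod = (floordiv, mod)
  let r := PySem.Int.floordiv real_value 8
  let c := PySem.Int.mod real_value 8
  let results : List (String × List (String × List Int)) := []
  let results := if vert = true then
      results ++ [("Vertical",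
        [("TOP", (PySem.List.pyRange 0 r 1).map (fun i => c + 8 * i)),
         ("BOT", (PySem.List.pyRange (r + 1) 8 1).map (fun i => c + 8 * i))])]
    else results
  let results := if hori = true then
      results ++ [("Horizontal",
        [("LEFT", (PySem.List.pyRange 0 c 1).map (fun j => 8 * r + j)),
         ("RIGHT", (PySem.List.pyRange (c + 1) 8 1).map (fun j => 8 * r + j))])]
    else results
  let results := if diag = true then
      results ++ [("Diagonal",
        [("TOP_LEFT", (PySem.List.pyRange 1 (min r c + 1) 1).map (fun i => real_value - 9 * i)),
         ("TOP_RIGHT", (PySem.List.pyRange 1 (min r (7 - c) + 1) 1).map (fun i => real_value - 7 * i)),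
         ("BOT_LEFT", (PySem.List.pyRange 1 (min (7 - r) c + 1) 1).map (fun i => real_value + 7 * i)),
         ("BOT_RIGHT", (PySem.List.pyRange 1 (min (7 - r) (7 - c) + 1) 1).map (fun i => real_value + 9 * i))])]
    else results
  results

-- ===== PRECONDITION & SPEC =====
-- If any flag is set, A raises (IndexError/ValueError/AttributeError) for squares off the
-- 0..63 board; with all flags False A returns {} for every real_value.
def Pre_sides (real_value : Int) (vert : Bool) (hori : Bool) (diag : Bool) : Prop :=
  (vert = true ∨ hori = true ∨ diag = true) → (0 ≤ real_value ∧ real_value ≤ 63)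
instance (real_value : Int) (vert : Bool) (hori : Bool) (diag : Bool) : Decidable (Pre_sides real_value vert hori diag) := by unfold Pre_sides; infer_instance

def pvWitness_sides : Int × Bool × Bool × Bool := (27, true, true, true)

def Spec_sides (real_value : Int) (vert : Bool) (hori : Bool) (diag : Bool) (out : List (String × List (String × List Int))) : Prop := out = sides_alt real_value vert hori diag
instance (real_value : Int) (vert : Bool) (hori : Bool) (diag : Bool) (out : List (String × List (String × List Int))) : Decidable (Spec_sides real_value vert hori diag out) := by unfold Spec_sides; infer_instance

-- ===== CLAIM (what is proved, stated in full; the proofs are below) =====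
def Claim_equal_sides : Prop := ∀ (real_value : Int) (vert : Bool) (hori : Bool) (diag : Bool), Dom_sides real_value vert hori diag → Pre_sides real_value vert hori diag → Spec_sides real_value vert hori diag (sides real_value vert hori diag)

-- ===== LEMMAS AND PROOFS =====

-- both programs agree on every board square and every flag combination: finite check
theorem pv_board_check : ∀ (n : Fin 64) (v h d : Bool),
    sides ((n.val : Nat) : Int) v h d = sides_alt ((n.val : Nat) : Int) v h d := by
  decide

-- ===== VERDICT (by name: the statement is the Claim_ definition above) =====
theorem sides_spec : Claim_equal_sides := by
  intro rv v h d _ hpre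
  unfold Spec_sides
  by_cases hflag : v = true ∨ h = true ∨ d = true
  · obtain ⟨h0, h1⟩ := hpre hflag
    have hn : rv.toNat < 64 := by omega
    have heq : rv = ((rv.toNat : Nat) : Int) := by omega
    rw [heq]
    exact pv_board_check ⟨rv.toNat, hn⟩ v h d
  · push Not at hflag
    obtain ⟨hv, hh, hd⟩ := hflag
    simp only [Bool.not_eq_true] at hv hh hd
    subst hv; subst hh; subst hd
    rfl
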